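-- pv_equiv track=rewrite | github.com/SadParad1se/roche-cipher | main.py | create_key_table
-- ===== SOURCE A (Python) =====
-- import string
-- from typing import List, Tuple
--
-- def create_key_table(key: str) -> List[Tuple[str, int]]:
--     """
--     Create an ordered key table.
--     :param key: A word used for decoding
--     :return: Key table
--     """
--     ordered_key = {}
--     order = 1
--     for letter in string.ascii_lowercase:
--         for i in range(len(key)):
--             if key[i] == letter:
--                 ordered_key[i] = (key[i], order)
--                 order += 1
--
--     return [ordered_key[i] for i in range(len(ordered_key))]
-- ===== SOURCE B (Python) =====
-- import string
-- from typing import List, Tuple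
--
-- def create_key_table(key: str) -> List[Tuple[str, int]]:
--     """
--     Create an ordered key table.
--     :param key: A word used for decoding
--     :return: Key table
--     """
--     pairs = sorted((ch, i) for i, ch in enumerate(key) if ch in string.ascii_lowercase)
--     ordered_key = {i: (ch, order) for order, (ch, i) in enumerate(pairs, 1)}
--     return [ordered_key[i] for i in range(len(ordered_key))]
-- ===== Notes on version B (the rewrite author's own statement) =====
-- stated objective: faster
-- what changed: A ranks key letters by scanning the whole key once per alphabet letter (26 passes) with a running counter; B builds the (letter, position) pairs in one pass, sorts them once (tuple order gives letter-then-position ranks), and assigns ranks by a single enumerate pass.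
import Mathlib
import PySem

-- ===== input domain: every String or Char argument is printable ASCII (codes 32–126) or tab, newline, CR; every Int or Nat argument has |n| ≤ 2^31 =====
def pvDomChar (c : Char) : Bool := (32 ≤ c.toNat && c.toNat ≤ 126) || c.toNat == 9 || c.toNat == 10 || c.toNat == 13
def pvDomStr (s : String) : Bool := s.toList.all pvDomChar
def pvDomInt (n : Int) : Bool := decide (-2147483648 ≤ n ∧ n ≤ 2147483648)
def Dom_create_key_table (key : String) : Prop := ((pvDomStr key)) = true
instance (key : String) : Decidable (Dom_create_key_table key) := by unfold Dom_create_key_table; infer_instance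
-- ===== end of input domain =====

-- B replaces A's 26-pass scan (one sweep over the key per alphabet letter, with a running rank
-- counter) by a single sort of the (letter, position) pairs followed by one enumeration pass
-- that assigns the ranks (objective: alternative).

-- ===== PORT A =====
-- string.ascii_lowercase, as its list of characters (Python iterates it as 1-char strings;
-- equality of 1-char strings is exactly equality of their characters, so the port compares Chars).
def pvLower : List Char := "abcdefghijklmnopqrstuvwxyz".toList

-- Literal port of A: dict ordered_key keyed by the position (Python int → Int), running counter
-- `order`; the final comprehension's lookup ordered_key[i] (KeyError = none) is rendered total
-- with .getD — exact under Pre_create_key_table, where every lookup hits.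
def create_key_table (key : String) : List (String × Int) :=
  let ks := key.toList
  let st := pvLower.foldl
    (fun (st : PySem.Dict Int (String × Int) × Int) letter =>
      (PySem.List.pyRange 0 (PySem.Str.len key) 1).foldl
        (fun st i =>
          if PySem.List.pyGetD ks i ' ' = letter then
            (st.1.insert i (String.singleton (PySem.List.pyGetD ks i ' '), st.2), st.2 + 1)
          else st)
        st)
    (PySem.Dict.empty, 1)
  (PySem.List.pyRange 0 (st.1.size : Int) 1).map (fun i => (st.1.get? i).getD ("", 0))

-- ===== PORT B =====
-- Literal port of B (Source B): sorted (letter, position) tuples — Python orders the 1-char-string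
-- tuples lexicographically, which on 1-char strings is exactly the (Char, Int) tuple order, and
-- `ch in string.ascii_lowercase` for a 1-char string is membership in pvLower — then the dict
-- comprehension over enumerate(pairs, 1), then the same final comprehension as A (its lookup
-- rendered total with .getD, exact under Pre_create_key_table).
def create_key_table_alt (key : String) : List (String × Int) :=
  let pairs := PySem.List.sorted2
    ((PySem.List.enumerate key.toList 0).filterMap
      (fun q => if q.2 ∈ pvLower then some (q.2, q.1) else none))
    (fun p => p.1) (fun p => p.2)
  let d := (PySem.List.enumerate pairs 1).foldl
    (fun (d : PySem.Dict Int (String × Int)) q => d.insert q.2.2 (String.singleton q.2.1, q.1))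
    PySem.Dict.empty
  (PySem.List.pyRange 0 (d.size : Int) 1).map (fun i => (d.get? i).getD ("", 0))

-- ===== PRECONDITION & SPEC =====
-- Pre_ excludes exactly the keys on which the Python (A and B alike) raises KeyError in the
-- final comprehension: keys where some non-lowercase character sits at a position below the
-- number of lowercase characters (a "gappy" key, e.g. "a!b").
def Pre_create_key_table (key : String) : Prop :=
  (key.toList.take (key.toList.countP (fun c => decide ('a' ≤ c ∧ c ≤ 'z')))).all
    (fun c => decide ('a' ≤ c ∧ c ≤ 'z')) = true

instance (key : String) : Decidable (Pre_create_key_table key) := by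
  unfold Pre_create_key_table; infer_instance

def pvWitness_create_key_table : String := "banana"

def Spec_create_key_table (key : String) (out : List (String × Int)) : Prop :=
  out = create_key_table_alt key
instance (key : String) (out : List (String × Int)) : Decidable (Spec_create_key_table key out) := by
  unfold Spec_create_key_table; infer_instance

-- ===== CLAIM (what is proved, stated in full; the proofs are below) =====
def Claim_equal_create_key_table : Prop := ∀ (key : String), Dom_create_key_table key → Pre_create_key_table key → Spec_create_key_table key (create_key_table key)

-- ===== LEMMAS AND PROOFS =====

-- The insertion A performs for one matching position, with the running counter.
def pvBody (st : PySem.Dict Int (String × Int) × Int) (p : Char × Int) :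
    PySem.Dict Int (String × Int) × Int :=
  (st.1.insert p.2 (String.singleton p.1, st.2), st.2 + 1)

-- B's unsorted (letter, position) pair list.
def pvPairs (key : String) : List (Char × Int) :=
  (PySem.List.enumerate key.toList 0).filterMap
    (fun q => if q.2 ∈ pvLower then some (q.2, q.1) else none)

-- The pair list in the order A visits matches: grouped by letter, positions increasing.
def pvE (key : String) : List (Char × Int) :=
  pvLower.flatMap (fun c => (pvPairs key).filter (fun p => p.1 == c))

lemma enum_eq_map_range {α : Type} (d : α) : ∀ (ks : List α) (s : Int),
    PySem.List.enumerate ks s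
      = (List.range ks.length).map (fun (j : Nat) => (s + (j : Int), ks.getD j d)) := by
  intro ks
  induction ks with
  | nil => intro s; simp [PySem.List.enumerate]
  | cons x t ih =>
    intro s
    rw [PySem.List.enumerate_cons, ih (s + 1)]
    simp [List.range_succ_eq_map, List.map_map, Function.comp_def]
    intro a _
    omega

lemma filterMap_swap {α β : Type} (P : β → Prop) [DecidablePred P] :
    ∀ (l : List (α × β)),
    l.filterMap (fun q => if P q.2 then some (q.2, q.1) else none)
      = (l.map (fun q => (q.2, q.1))).filter (fun p => decide (P p.1)) := by
  intro l
  induction l with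
  | nil => rfl
  | cons x t ih =>
    by_cases h : P x.2 <;> simp [h, ih]

lemma pvPairs_eq_filter (key : String) :
    pvPairs key = ((List.range key.toList.length).map
        (fun (j : Nat) => (key.toList.getD j ' ', (j : Int)))).filter
      (fun p => decide (p.1 ∈ pvLower)) := by
  unfold pvPairs
  rw [enum_eq_map_range ' ', filterMap_swap (fun c => c ∈ pvLower)]
  simp [List.map_map, Function.comp_def]

-- A's inner loop over range(len(key)) for one letter = fold of pvBody over that letter's group.
lemma inner_loop_eq (key : String) (c : Char) (hc : c ∈ pvLower)
    (st : PySem.Dict Int (String × Int) × Int) :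
    (PySem.List.pyRange 0 (PySem.Str.len key) 1).foldl
      (fun st i =>
        if PySem.List.pyGetD key.toList i ' ' = c then
          (st.1.insert i (String.singleton (PySem.List.pyGetD key.toList i ' '), st.2), st.2 + 1)
        else st) st
    = ((pvPairs key).filter (fun p => p.1 == c)).foldl pvBody st := by
  rw [PySem.Str.len_eq, PySem.List.pyRange_zero_nat, List.foldl_map]
  rw [pvPairs_eq_filter, List.filter_filter]
  rw [List.filter_congr (q := fun p => p.1 == c) ?_]
  · rw [List.foldl_filter, List.foldl_map]
    apply PySem.List.foldl_congr_mem
    intro st j _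
    simp [pvBody, PySem.List.pyGetD_natCast, beq_iff_eq]
  · intro p _
    by_cases h : p.1 = c <;> simp [h, hc]

-- A's whole nested loop = fold of pvBody over pvE.
lemma a_fold_eq (key : String) :
    pvLower.foldl
      (fun (st : PySem.Dict Int (String × Int) × Int) letter =>
        (PySem.List.pyRange 0 (PySem.Str.len key) 1).foldl
          (fun st i =>
            if PySem.List.pyGetD key.toList i ' ' = letter then
              (st.1.insert i (String.singleton (PySem.List.pyGetD key.toList i ' '), st.2), st.2 + 1)
            else st) st)
      (PySem.Dict.empty, 1)
    = (pvE key).foldl pvBody (PySem.Dict.empty, 1) := by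
  unfold pvE
  rw [List.foldl_flatMap]
  apply PySem.List.foldl_congr_mem
  intro st c hc
  exact inner_loop_eq key c hc st

-- The running-counter fold is the fold over the enumeration with start o.
lemma fold_body_eq_enum (l : List (Char × Int)) :
    ∀ (d : PySem.Dict Int (String × Int)) (o : Int),
    l.foldl pvBody (d, o)
      = ((PySem.List.enumerate l o).foldl
          (fun d q => d.insert q.2.2 (String.singleton q.2.1, q.1)) d,
         o + l.length) := by
  induction l with
  | nil => intro d o; simp [PySem.List.enumerate]
  | cons x t ih =>
    intro d o
    rw [List.foldl_cons, PySem.List.enumerate_cons, List.foldl_cons]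
    show t.foldl pvBody (d.insert x.2 (String.singleton x.1, o), o + 1) = _
    rw [ih]
    simp; omega

-- sorted(pairs) with the (Char, Int) tuple key is sorted with the lexicographic key.
lemma sorted2_eq_sorted_toLex {α : Type} (xs : List α) (k1 : α → Char) (k2 : α → Int) :
    PySem.List.sorted2 xs k1 k2
      = PySem.List.sorted xs (fun x => toLex (k1 x, k2 x)) := by
  have hfun : (fun (a b : α) => decide (k1 a < k1 b) || (!decide (k1 b < k1 a) && decide (k2 a < k2 b)))
      = (fun (a b : α) => decide ((toLex (k1 a, k2 a)) < (toLex (k1 b, k2 b)))) := by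
    funext a b
    rcases lt_trichotomy (k1 a) (k1 b) with h | h | h
    · simp [Prod.Lex.toLex_lt_toLex, h, asymm h]
    · simp [Prod.Lex.toLex_lt_toLex, h]
    · simp [Prod.Lex.toLex_lt_toLex, h, asymm h, h.ne']
  simp only [PySem.List.sorted2, PySem.List.sorted, if_neg (Bool.false_ne_true)]
  rw [hfun]

-- Grouping a pair list by its (distinct) first components permutes it.
lemma flatMap_filter_perm {β : Type} [DecidableEq β] :
    ∀ (cs : List β) (l : List (β × Int)), cs.Nodup → (∀ p ∈ l, p.1 ∈ cs) →
    (cs.flatMap (fun c => l.filter (fun p => p.1 == c))).Perm l := by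
  intro cs
  induction cs with
  | nil =>
    intro l _ h
    have : l = [] := by
      cases l with
      | nil => rfl
      | cons x t => exact absurd (h x (by simp)) (by simp)
    simp [this]
  | cons c cs ih =>
    intro l hnd h
    rw [List.flatMap_cons]
    have htail : ∀ c' ∈ cs, l.filter (fun p => p.1 == c')
        = (l.filter (fun p => !(p.1 == c))).filter (fun p => p.1 == c') := by
      intro c' hc'
      rw [List.filter_filter]
      apply (List.filter_congr ?_).symm
      intro p _
      by_cases hp : p.1 = c'
      · have : c' ≠ c := by rintro rfl; exact (List.nodup_cons.mp hnd).1 hc'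
        simp [hp, this]
      · simp [hp]
    have hflat : cs.flatMap (fun c' => l.filter (fun p => p.1 == c'))
        = cs.flatMap (fun c' => (l.filter (fun p => !(p.1 == c))).filter (fun p => p.1 == c')) := by
      apply List.flatMap_congr
      intro c' hc'
      exact htail c' hc'
    rw [hflat]
    refine ((List.filter_append_perm (fun p => p.1 == c) l).symm.trans ?_).symm
    apply List.Perm.symm
    apply List.Perm.append_left
    apply ih
    · exact (List.nodup_cons.mp hnd).2
    · intro p hp
      rw [List.mem_filter] at hp
      have := h p hp.1
      simp at hp ⊢
      rcases List.mem_cons.mp this with h' | h'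
      · exact absurd h' hp.2
      · exact h'

lemma mem_pvPairs_fst (key : String) : ∀ p ∈ pvPairs key, p.1 ∈ pvLower := by
  intro p hp
  unfold pvPairs at hp
  rw [List.mem_filterMap] at hp
  obtain ⟨q, _, hq⟩ := hp
  by_cases h : q.2 ∈ pvLower
  · rw [if_pos h] at hq; cases hq; exact h
  · rw [if_neg h] at hq; cases hq

lemma pvE_perm (key : String) : (pvE key).Perm (pvPairs key) :=
  flatMap_filter_perm pvLower (pvPairs key) (by decide) (mem_pvPairs_fst key)

lemma pvPairs_pairwise_snd (key : String) :
    (pvPairs key).Pairwise (fun a b => a.2 < b.2) := by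
  rw [pvPairs_eq_filter]
  apply List.Pairwise.filter
  rw [List.pairwise_map]
  apply List.Pairwise.imp ?_ (List.pairwise_lt_range (n := key.toList.length))
  intro a b h
  simpa using h

lemma pvE_pairwise (key : String) :
    (pvE key).Pairwise (fun a b => toLex (a.1, a.2) < toLex (b.1, b.2)) := by
  unfold pvE
  rw [List.pairwise_flatMap]
  constructor
  · intro c _
    apply List.Pairwise.imp_of_mem ?_ ((pvPairs_pairwise_snd key).filter _)
    intro a b ha hb h
    rw [List.mem_filter] at ha hb
    have ha1 : a.1 = c := by simpa using ha.2
    have hb1 : b.1 = c := by simpa using hb.2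
    rw [Prod.Lex.toLex_lt_toLex]
    right
    exact ⟨ha1.trans hb1.symm, h⟩
  · have hlow : pvLower.Pairwise (· < ·) := by decide
    apply List.Pairwise.imp_of_mem ?_ hlow
    intro c1 c2 _ _ h x hx y hy
    rw [List.mem_filter] at hx hy
    have hx1 : x.1 = c1 := by simpa using hx.2
    have hy1 : y.1 = c2 := by simpa using hy.2
    rw [Prod.Lex.toLex_lt_toLex]
    left
    rw [hx1, hy1]
    exact h

-- B's sort produces exactly the list in A's visiting order.
lemma sorted_pairs_eq (key : String) :
    PySem.List.sorted2 (pvPairs key) (fun p => p.1) (fun p => p.2) = pvE key := by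
  rw [sorted2_eq_sorted_toLex]
  exact PySem.List.sorted_eq_of_perm_of_pairwise_lt _ _ _ (pvE_perm key) (pvE_pairwise key)

-- The two programs build the IDENTICAL dict, so they agree on every key.
lemma main_eq (key : String) : create_key_table key = create_key_table_alt key := by
  unfold create_key_table create_key_table_alt
  dsimp only
  rw [a_fold_eq key, fold_body_eq_enum]
  rw [show ((PySem.List.enumerate key.toList 0).filterMap
      (fun q => if q.2 ∈ pvLower then some (q.2, q.1) else none)) = pvPairs key from rfl]
  rw [sorted_pairs_eq key]

-- ===== VERDICT (by name: the statement is the Claim_ definition above) =====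
theorem create_key_table_spec : Claim_equal_create_key_table := by
  intro key _ _
  unfold Spec_create_key_table
  exact main_eq key
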